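-- pv_equiv track=rewrite | github.com/niekvleeuwen/advent-of-code | 2025/dag_6/dag_6.py | part_1
-- ===== SOURCE A (Python) =====
-- import math
--
-- def apply_operator(operator: str, values: list[int]) -> int:
--     if operator == "+":
--         return sum(values)
--     if operator == "*":
--         return math.prod(values)
--     raise ValueError("Invalid operator")
--
-- def part_1(lines: list[str]) -> int:
--     lines = [line.split() for line in lines]
--     values = lines[:-1]
--     operators = lines[-1]
--
--     total = 0
--     no_of_vals = len(values)
--     for i, operator in enumerate(operators):
--         col = []
--         for j in range(no_of_vals):
--             col.append(int(values[j][i]))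
--
--         total += apply_operator(operator, col)
--     return total
-- ===== SOURCE B (Python) =====
-- def _init(operator: str) -> int:
--     if operator == "+":
--         return 0
--     if operator == "*":
--         return 1
--     raise ValueError("Invalid operator")
--
--
-- def part_1(lines: list[str]) -> int:
--     rows = [line.split() for line in lines]
--     values, operators = rows[:-1], rows[-1]
--
--     acc = [_init(op) for op in operators]
--     for row in values:
--         acc = [a + int(v) if op == "+" else a * int(v)
--                for op, a, v in zip(operators, acc, row)]
--     return sum(acc)
-- ===== Notes on version B (the rewrite author's own statement) =====
-- stated objective: alternative
-- what changed: Single row-major pass keeping one running accumulator per column (initialized 0 for '+', 1 for '*') updated via zip, instead of materializing each column list and reducing it with sum/prod.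
import Mathlib
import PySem

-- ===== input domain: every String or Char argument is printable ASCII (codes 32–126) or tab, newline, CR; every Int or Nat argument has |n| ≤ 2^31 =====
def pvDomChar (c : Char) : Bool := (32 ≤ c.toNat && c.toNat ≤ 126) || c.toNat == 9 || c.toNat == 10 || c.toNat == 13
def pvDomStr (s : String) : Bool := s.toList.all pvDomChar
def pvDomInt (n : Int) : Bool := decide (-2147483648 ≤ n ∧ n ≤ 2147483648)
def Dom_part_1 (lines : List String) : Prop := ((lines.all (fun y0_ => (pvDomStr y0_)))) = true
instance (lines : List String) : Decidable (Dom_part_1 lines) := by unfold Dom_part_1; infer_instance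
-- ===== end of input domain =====

-- B replaces A's column-materialize-then-reduce with one row-major pass over running
-- per-column accumulators (0 for '+', 1 for '*') updated via zip (objective: alternative).

-- ===== PORT A =====
-- apply_operator; the final 'raise ValueError' is unreachable under Pre_ (total default 0)
def applyOperator (operator : String) (values : List Int) : Int :=
  if operator = "+" then values.sum
  else if operator = "*" then values.prod
  else 0

def part_1 (lines : List String) : Int :=
  let rows := lines.map PySem.Str.split₀
  let values := PySem.List.slice rows none (some (-1))
  let operators := PySem.List.pyGetD rows (-1) []
  let total : Int := 0
  let no_of_vals := values.length
  (PySem.List.enumerate operators 0).foldl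
    (fun total p =>
      let col := (PySem.List.pyRange 0 (no_of_vals : Int) 1).foldl
        (fun col j =>
          col ++ [(PySem.Int.ofStr? (PySem.List.pyGetD (PySem.List.pyGetD values j []) p.1 "")).getD 0]) []
      total + applyOperator p.2 col) total

-- ===== PORT B =====
-- _init; the 'raise ValueError' branch is unreachable under Pre_ (total default 1)
def pvInit (operator : String) : Int :=
  if operator = "+" then 0
  else if operator = "*" then 1
  else 1

def part_1_alt (lines : List String) : Int :=
  let rows := lines.map PySem.Str.split₀
  let values := PySem.List.slice rows none (some (-1))
  let operators := PySem.List.pyGetD rows (-1) []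
  let acc0 := operators.map pvInit
  let accN := values.foldl
    (fun acc row =>
      (operators.zip (acc.zip row)).map
        (fun t => if t.1 = "+" then t.2.1 + (PySem.Int.ofStr? t.2.2).getD 0
                  else t.2.1 * (PySem.Int.ofStr? t.2.2).getD 0)) acc0
  accN.sum

-- ===== PRECONDITION & SPEC =====
-- Pre_ = exactly the inputs where Python A returns: a nonempty list, every operator
-- '+' or '*', and every value row at least as long as the operator row with int-parsable
-- cells in the first len(operators) columns (otherwise A raises Index/ValueError).
def Pre_part_1 (lines : List String) : Prop :=
  lines ≠ [] ∧
  (∀ op ∈ (lines.map PySem.Str.split₀).getLastD [], op = "+" ∨ op = "*") ∧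
  (∀ r ∈ (lines.map PySem.Str.split₀).dropLast,
     ((lines.map PySem.Str.split₀).getLastD []).length ≤ r.length ∧
     ∀ s ∈ r.take ((lines.map PySem.Str.split₀).getLastD []).length,
       (PySem.Int.ofStr? s).isSome = true)
instance (lines : List String) : Decidable (Pre_part_1 lines) := by unfold Pre_part_1; infer_instance

def pvWitness_part_1 : List String := ["1 2", "3 4", "+ *"]

def Spec_part_1 (lines : List String) (out : Int) : Prop := out = part_1_alt lines
instance (lines : List String) (out : Int) : Decidable (Spec_part_1 lines out) := by unfold Spec_part_1; infer_instance

-- ===== CLAIM (what is proved, stated in full; the proofs are below) =====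
def Claim_equal_part_1 : Prop := ∀ (lines : List String), Dom_part_1 lines → Pre_part_1 lines → Spec_part_1 lines (part_1 lines)

-- ===== LEMMAS AND PROOFS =====

-- value of a cell in the ports' total rendering of int(...)
def pvVal (s : String) : Int := (PySem.Int.ofStr? s).getD 0

-- B's per-cell update step (identical to the lambda in part_1_alt)
def pvStep (t : String × Int × String) : Int :=
  if t.1 = "+" then t.2.1 + (PySem.Int.ofStr? t.2.2).getD 0
  else t.2.1 * (PySem.Int.ofStr? t.2.2).getD 0

-- structural (column-peeling) reference value both ports are reduced to
def pvColSum (ops : List String) (values : List (List String)) : Int :=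
  match ops with
  | [] => 0
  | op :: ops => applyOperator op (values.map (fun r => pvVal (r.headD ""))) + pvColSum ops (values.map List.tail)

theorem pv_col_eq (values : List (List String)) (i : Int) :
    (PySem.List.pyRange 0 (values.length : Int) 1).foldl
      (fun col j =>
        col ++ [(PySem.Int.ofStr? (PySem.List.pyGetD (PySem.List.pyGetD values j []) i "")).getD 0]) []
    = values.map (fun r => pvVal (PySem.List.pyGetD r i "")) := by
  rw [PySem.List.foldl_pyRange_zero_pyGetD' values ([] : List String)
      (fun col r => col ++ [(PySem.Int.ofStr? (PySem.List.pyGetD r i "")).getD 0]) []]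
  rw [PySem.List.foldl_append_singleton_eq_map]
  simp [pvVal]

theorem pv_col_eq_under (vals : List (List String)) (ops : List String) :
    (PySem.List.enumerate ops 0).foldl
      (fun total p =>
        let col := (PySem.List.pyRange 0 (vals.length : Int) 1).foldl
          (fun col j =>
            col ++ [(PySem.Int.ofStr? (PySem.List.pyGetD (PySem.List.pyGetD vals j []) p.1 "")).getD 0]) []
        total + applyOperator p.2 col) 0
    = (PySem.List.enumerate ops 0).foldl
        (fun total p => total + applyOperator p.2 (vals.map (fun r => pvVal (PySem.List.pyGetD r p.1 "")))) 0 := by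
  refine PySem.List.foldl_congr_mem _ _ _ _ ?_
  intro acc p _
  simp only [pv_col_eq]

theorem pv_A_char (ops : List String) (s : Nat) (values : List (List String)) :
    ((PySem.List.enumerate ops (s : Int)).map
      (fun p => applyOperator p.2 (values.map (fun r => pvVal (PySem.List.pyGetD r p.1 ""))))).sum
    = pvColSum ops (values.map (fun r => r.drop s)) := by
  induction ops generalizing s with
  | nil => simp [pvColSum, PySem.List.enumerate]
  | cons op ops ih =>
    rw [PySem.List.enumerate_cons]
    have hs1 : (s : Int) + 1 = ((s + 1 : Nat) : Int) := by push_cast; ring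
    rw [List.map_cons, List.sum_cons, hs1, ih (s + 1)]
    simp only [pvColSum, List.map_map]
    congr 1
    · congr 1
      refine List.map_congr_left (fun r _ => ?_)
      simp [pvVal, Function.comp, PySem.List.pyGetD_natCast, List.getD_eq_getElem?_getD,
        List.head?_drop, List.headD_eq_head?_getD]
    · congr 1
      refine List.map_congr_left (fun r _ => ?_)
      simp [Function.comp, List.tail_drop]

theorem pv_B_peel (op : String) (ops : List String) (values : List (List String)) (a : Int) (acc : List Int)
    (h : ∀ r ∈ values, r ≠ []) :
    values.foldl (fun acc row => ((op :: ops).zip (acc.zip row)).map pvStep) (a :: acc)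
    = (values.foldl (fun b r => pvStep (op, b, r.headD "")) a)
      :: (values.map List.tail).foldl (fun acc row => (ops.zip (acc.zip row)).map pvStep) acc := by
  induction values generalizing a acc with
  | nil => simp
  | cons r rs ih =>
    obtain ⟨v, rest, rfl⟩ := List.exists_cons_of_ne_nil (h r (by simp))
    simp only [List.foldl_cons, List.map_cons, List.zip_cons_cons, List.tail_cons]
    rw [ih _ _ (fun r hr => h r (by simp [hr]))]
    simp

theorem pv_B_char (ops : List String) (values : List (List String))
    (hlen : ∀ r ∈ values, ops.length ≤ r.length)
    (hops : ∀ op ∈ ops, op = "+" ∨ op = "*") :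
    (values.foldl (fun acc row => (ops.zip (acc.zip row)).map pvStep) (ops.map pvInit)).sum
    = pvColSum ops values := by
  induction ops generalizing values with
  | nil =>
    have hfix : ∀ (vs : List (List String)),
        vs.foldl (fun (acc : List Int) (_ : List String) => ([] : List Int)) [] = [] := by
      intro vs
      induction vs with
      | nil => rfl
      | cons r rs ih => simpa using ih
    simp only [pvColSum, List.zip_nil_left, List.map_nil, hfix values, List.sum_nil]
  | cons op ops ih =>
    have hne : ∀ r ∈ values, r ≠ [] := by
      intro r hr
      have := hlen r hr
      intro hnil
      simp [hnil] at this
    simp only [List.map_cons]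
    rw [pv_B_peel op ops values (pvInit op) (ops.map pvInit) hne, List.sum_cons]
    rw [ih (values.map List.tail)
        (by
          intro r hr
          obtain ⟨r0, hr0, rfl⟩ := List.mem_map.mp hr
          have := hlen r0 hr0
          simp only [List.length_cons] at this
          simp [List.length_tail]
          omega)
        (fun o ho => hops o (by simp [ho]))]
    simp only [pvColSum]
    congr 1
    rcases hops op (by simp) with h | h <;> subst h
    · simp only [pvStep, pvInit, applyOperator, reduceIte]
      rw [PySem.List.foldl_add (g := fun r => (PySem.Int.ofStr? (List.headD r "")).getD 0)]
      simp [pvVal]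
    · simp only [pvStep, pvInit, applyOperator, reduceIte]
      rw [List.prod_eq_foldl, List.foldl_map]
      simp [pvVal]

-- ===== VERDICT (by name: the statement is the Claim_ definition above) =====
theorem part_1_spec : Claim_equal_part_1 := by
  intro lines _ hpre
  obtain ⟨hne, hops, hrows⟩ := hpre
  unfold Spec_part_1 part_1 part_1_alt
  have hrne : lines.map PySem.Str.split₀ ≠ [] := by simpa using hne
  have hlast : PySem.List.pyGetD (lines.map PySem.Str.split₀) (-1) ([] : List String)
      = (lines.map PySem.Str.split₀).getLastD [] := by
    rw [PySem.List.pyGetD_neg_one _ _ hrne, List.getLastD_eq_getLast?, List.getLast?_eq_getLast_of_ne_nil hrne]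
    simp
  simp only [PySem.List.slice_to_neg_one, hlast]
  rw [pv_col_eq_under]
  rw [PySem.List.foldl_add
    (g := fun p : Int × String => applyOperator p.2
      (((lines.map PySem.Str.split₀).dropLast).map (fun r => pvVal (PySem.List.pyGetD r p.1 ""))))]
  rw [zero_add]
  have hA := pv_A_char ((lines.map PySem.Str.split₀).getLastD []) 0 ((lines.map PySem.Str.split₀).dropLast)
  simp only [Nat.cast_zero, List.drop_zero, List.map_id'] at hA
  rw [hA]
  have hstep : (fun (t : String × Int × String) =>
      if t.1 = "+" then t.2.1 + (PySem.Int.ofStr? t.2.2).getD 0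
      else t.2.1 * (PySem.Int.ofStr? t.2.2).getD 0) = pvStep := rfl
  rw [hstep, pv_B_char _ _ (fun r hr => (hrows r hr).1) hops]
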